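-- pv_equiv track=rewrite | github.com/anandpdoshi/rigpl-erpnext | rigpl_erpnext/rigpl_erpnext/item.py | next_string
-- ===== SOURCE A (Python) =====
-- def next_string(bean,s):
-- 	if len(s) == 0:
-- 		return '1'
-- 	head = s[0:-1]
-- 	tail = s[-1]
-- 	if tail == 'Z':
-- 		return next_string(bean, head) + '0'
-- 	if tail == '9':
-- 		return head+'A'
-- 	if tail == 'H':
-- 		return head+'J'
-- 	if tail == 'N':
-- 		return head+'P'
-- 	return head + chr(ord(tail)+1)
-- ===== SOURCE B (Python) =====
-- def next_string(bean, s):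
--     i = len(s) - 1
--     while i >= 0 and s[i] == 'Z':
--         i -= 1
--     zeros = '0' * (len(s) - 1 - i)
--     if i < 0:
--         return '1' + zeros
--     c = s[i]
--     nc = {'9': 'A', 'H': 'J', 'N': 'P'}.get(c, chr(ord(c) + 1))
--     return s[:i] + nc + zeros
-- ===== Notes on version B (the rewrite author's own statement) =====
-- stated objective: simpler
-- what changed: Replaced the recursive carry propagation (rebuilding head strings at each level) by a single right-to-left scan that counts trailing 'Z's, increments the first non-'Z' once, and pads with zeros.
import Mathlib
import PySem

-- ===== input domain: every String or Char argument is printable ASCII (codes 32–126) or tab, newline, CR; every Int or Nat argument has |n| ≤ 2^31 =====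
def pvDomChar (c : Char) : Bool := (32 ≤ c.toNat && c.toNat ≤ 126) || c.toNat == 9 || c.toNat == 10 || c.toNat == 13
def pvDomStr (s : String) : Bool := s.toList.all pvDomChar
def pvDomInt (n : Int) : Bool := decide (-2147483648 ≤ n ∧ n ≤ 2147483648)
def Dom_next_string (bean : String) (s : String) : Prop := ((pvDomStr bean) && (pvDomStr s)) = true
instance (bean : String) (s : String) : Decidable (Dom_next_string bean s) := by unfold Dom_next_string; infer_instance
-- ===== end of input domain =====

-- B replaces A's recursive carry propagation by one right-to-left scan; objective: simpler.

-- ===== PORT A =====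
-- A recurses on s[0:-1] / s[-1]; we represent the string as its REVERSED char list,
-- so 'tail' (the last char) is the head of the list and the recursion is structural.
def nextStringAuxA : List Char → List Char
  | [] => ['1']
  | t :: headRev =>
    if t = 'Z' then nextStringAuxA headRev ++ ['0']
    else if t = '9' then headRev.reverse ++ ['A']
    else if t = 'H' then headRev.reverse ++ ['J']
    else if t = 'N' then headRev.reverse ++ ['P']
    else headRev.reverse ++ [Char.ofNat (t.toNat + 1)]

def next_string (bean : String) (s : String) : String :=
  String.mk (nextStringAuxA s.toList.reverse)

-- ===== PORT B =====
-- B's while-loop scanning from the right, counting trailing 'Z's in k.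
def nextStringAuxB : List Char → Nat → List Char
  | [], k => '1' :: List.replicate k '0'
  | c :: restRev, k =>
    if c = 'Z' then nextStringAuxB restRev (k + 1)
    else
      restRev.reverse ++
        [if c = '9' then 'A' else if c = 'H' then 'J' else if c = 'N' then 'P'
         else Char.ofNat (c.toNat + 1)] ++ List.replicate k '0'

def next_string_alt (bean : String) (s : String) : String :=
  String.mk (nextStringAuxB s.toList.reverse 0)

-- ===== PRECONDITION & SPEC =====
def Spec_next_string (bean : String) (s : String) (out : String) : Prop := out = next_string_alt bean s
instance (bean : String) (s : String) (out : String) : Decidable (Spec_next_string bean s out) := by unfold Spec_next_string; infer_instance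

-- ===== CLAIM (what is proved, stated in full; the proofs are below) =====
def Claim_equal_next_string : Prop := ∀ (bean : String) (s : String), Dom_next_string bean s → Spec_next_string bean s (next_string bean s)

-- ===== LEMMAS AND PROOFS =====
theorem nextStringAux_eq (rl : List Char) :
    ∀ k : Nat, nextStringAuxB rl k = nextStringAuxA rl ++ List.replicate k '0' := by
  induction rl with
  | nil => intro k; simp [nextStringAuxA, nextStringAuxB]
  | cons c rest ih =>
    intro k
    by_cases hz : c = 'Z'
    · simp [nextStringAuxA, nextStringAuxB, hz, ih (k + 1), List.replicate_succ]
    · simp only [nextStringAuxA, nextStringAuxB, if_neg hz]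
      split_ifs <;> simp

-- ===== VERDICT (by name: the statement is the Claim_ definition above) =====
theorem next_string_spec : Claim_equal_next_string := by
  intro bean s _
  show _ = _
  simp [next_string, next_string_alt, nextStringAux_eq]
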